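-- pv_equiv track=rewrite | github.com/hivesolutions/colony-plugins | misc/src/misc/string_normalization/string_normalization_system.py | _count_valid_lines
-- ===== SOURCE A (Python) =====
-- NEWLINE = "\n"
--
-- NEWLINE_WINDOWS = "\r\n"
--
-- def _count_valid_lines(lines_list):
--     # starts the index value with the length
--     # of the lines list
--     index = len(lines_list)
--
--     # inverts the lines list order to count
--     # the valid lines
--     lines_list.reverse()
--
--     # iterates over all the lines in the lines list
--     # in order to count the number of valid lines
--     for line in lines_list:
--         # in case the line is not just a newline character
--         if not line in (NEWLINE, NEWLINE_WINDOWS):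
--             break
--
--         # decrements the index value
--         index -= 1
--
--     # inverts the lines list order (to get back
--     # to the original order)
--     lines_list.reverse()
--
--     # returns the index value as the number of valid
--     # lines in the lines list
--     return index
-- ===== SOURCE B (Python) =====
-- NEWLINE = "\n"
--
-- NEWLINE_WINDOWS = "\r\n"
--
-- def _count_valid_lines(lines_list):
--     # the count of valid lines is the 1-based position of the LAST line that
--     # is not a pure newline: take the maximum such position, 0 if none exist
--     return max((i + 1 for i, line in enumerate(lines_list)
--                 if line not in (NEWLINE, NEWLINE_WINDOWS)), default=0)
-- ===== Notes on version B (the rewrite author's own statement) =====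
-- stated objective: simpler
-- what changed: Replaced the reverse-mutate-scan-break-reverse loop by a one-expression maximum of the 1-based positions of non-newline lines (default 0), with no loop state and no mutation.
import Mathlib
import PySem

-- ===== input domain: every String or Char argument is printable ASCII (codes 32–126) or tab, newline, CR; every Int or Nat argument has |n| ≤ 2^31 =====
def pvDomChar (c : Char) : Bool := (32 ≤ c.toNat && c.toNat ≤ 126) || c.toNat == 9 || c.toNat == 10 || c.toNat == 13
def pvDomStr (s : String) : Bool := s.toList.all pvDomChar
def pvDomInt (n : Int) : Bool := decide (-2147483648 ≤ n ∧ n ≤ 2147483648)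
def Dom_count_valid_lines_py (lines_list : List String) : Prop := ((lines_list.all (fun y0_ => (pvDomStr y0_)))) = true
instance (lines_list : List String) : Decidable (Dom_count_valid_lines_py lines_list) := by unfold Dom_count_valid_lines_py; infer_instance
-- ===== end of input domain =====

-- B replaces A's reverse/scan-with-break/reverse by the maximum 1-based position of a
-- non-newline line (0 if none): simpler, one expression, no mutation — A's two in-place
-- reverses cancel, so the caller observes no net mutation either.


-- ===== PORT A =====
-- for-loop over the reversed list, decrementing index, with break on a non-newline line
def pvALoop : List String → Int → Int
  | [], index => index
  | line :: rest, index =>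
      if ¬ (line == "\n" || line == "\r\n") then index
      else pvALoop rest (index - 1)

def count_valid_lines_py (lines_list : List String) : Int :=
  pvALoop lines_list.reverse (lines_list.length : Int)

-- ===== PORT B =====
-- max(i+1 for i, line in enumerate(lines_list) if line not in (...)) with default 0:
-- enumerate, filter, map to i+1, then Python's max as a left fold from the default
def count_valid_lines_py_alt (lines_list : List String) : Int :=
  ((((PySem.List.enumerate lines_list).filter
      (fun p => !(p.2 == "\n" || p.2 == "\r\n"))).map
      (fun p => p.1 + 1)).foldl max 0)

-- ===== PRECONDITION & SPEC =====
def Spec_count_valid_lines_py (lines_list : List String) (out : Int) : Prop := out = count_valid_lines_py_alt lines_list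
instance (lines_list : List String) (out : Int) : Decidable (Spec_count_valid_lines_py lines_list out) := by unfold Spec_count_valid_lines_py; infer_instance

-- ===== CLAIM (what is proved, stated in full; the proofs are below) =====
def Claim_equal_count_valid_lines_py : Prop := ∀ (lines_list : List String), Dom_count_valid_lines_py lines_list → Spec_count_valid_lines_py lines_list (count_valid_lines_py lines_list)

-- ===== LEMMAS AND PROOFS =====
theorem pvFoldlMax_le (l : List Int) : ∀ (a b : Int), a ≤ b → (∀ x ∈ l, x ≤ b) →
    l.foldl max a ≤ b := by
  induction l with
  | nil => intro a b ha _; simpa [List.foldl] using ha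
  | cons x xs ih =>
      intro a b ha h
      simp only [List.foldl]
      exact ih _ b (max_le ha (h x (by simp))) (fun y hy => h y (by simp [hy]))

theorem pvBval_le (xs : List String) : count_valid_lines_py_alt xs ≤ (xs.length : Int) := by
  unfold count_valid_lines_py_alt
  apply pvFoldlMax_le
  · exact Int.natCast_nonneg _
  · intro x hx
    simp only [List.mem_map, List.mem_filter] at hx
    obtain ⟨p, ⟨hp, _⟩, rfl⟩ := hx
    rw [PySem.List.mem_enumerate_iff] at hp
    obtain ⟨k, hk, rfl⟩ := hp
    simp only [Int.zero_add]
    omega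

theorem pvMain (xs : List String) :
    pvALoop xs.reverse (xs.length : Int) = count_valid_lines_py_alt xs := by
  induction xs using List.reverseRecOn with
  | nil => simp [pvALoop, count_valid_lines_py_alt, PySem.List.enumerate]
  | append_singleton ys l ih =>
      have henum : PySem.List.enumerate (ys ++ [l]) 0 =
          PySem.List.enumerate ys 0 ++ [((ys.length : Int), l)] := by
        rw [PySem.List.enumerate_append]
        simp [PySem.List.enumerate_cons, PySem.List.enumerate_nil]
      rw [List.reverse_append]
      simp only [List.reverse_cons, List.reverse_nil, List.nil_append, List.cons_append, pvALoop]
      unfold count_valid_lines_py_alt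
      rw [henum, List.filter_append, List.map_append, List.foldl_append]
      by_cases h : (l == "\n" || l == "\r\n") = true
      · rw [if_neg (by simp [h])]
        have hl : ((ys ++ [l]).length : Int) - 1 = (ys.length : Int) := by simp
        rw [hl]
        simp only [List.filter_cons, h, List.filter_nil]
        simp only [Bool.not_true, if_neg (by simp : ¬ (false = true))]
        simpa [count_valid_lines_py_alt] using ih
      · rw [if_pos (by simpa using h)]
        simp only [List.filter_cons]
        rw [if_pos (by simp_all)]
        simp only [List.filter_nil, List.map_cons, List.map_nil, List.foldl_cons, List.foldl_nil]
        have := pvBval_le ys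
        unfold count_valid_lines_py_alt at this
        simp only [List.length_append, List.length_cons, List.length_nil]
        rw [max_eq_right (by omega)]
        push_cast; ring

-- ===== VERDICT (by name: the statement is the Claim_ definition above) =====
theorem count_valid_lines_py_spec : Claim_equal_count_valid_lines_py := by
  intro xs _
  unfold Spec_count_valid_lines_py count_valid_lines_py
  exact pvMain xs
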